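-- pv_equiv track=rewrite | github.com/xiyaozhuang/aoc25 | src/aoc25/day06.py | part1
-- ===== SOURCE A (Python) =====
-- def part1(data):
--     rows = [string.split(" ") for string in data]
--     columns = {}
--
--     for i in range(len(rows)):
--         count = 0
--
--         for string in rows[i]:
--             if len(string) > 0:
--                 if count not in columns:
--                     columns[count] = [string]
--
--                 else:
--                     columns[count] += [string]
--
--                 count += 1
--
--         count = 0
--
--     for column in columns.values():
--         operator = column[-1]
--
--         if operator == "+":
--             add = 0
--
--             for string in column[:-1]:
--                 add += int(string)
--
--             count += add
--
--         elif operator == "*":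
--             mul = 1
--
--             for string in column[:-1]:
--                 mul *= int(string)
--
--             count += mul
--
--     return count
-- ===== SOURCE B (Python) =====
-- def part1(data):
--     token_rows = [[t for t in s.split(" ") if t] for s in data]
--     state = {}  # column index -> None (skipped column) or (operator, running accumulator)
--     for row in reversed(token_rows):
--         for j, t in enumerate(row):
--             if j not in state:
--                 state[j] = ("+", 0) if t == "+" else ("*", 1) if t == "*" else None
--             elif state[j] is not None:
--                 op, acc = state[j]
--                 state[j] = (op, acc + int(t)) if op == "+" else (op, acc * int(t))
--     return sum(v[1] for v in state.values() if v is not None)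
-- ===== Notes on version B (the rewrite author's own statement) =====
-- stated objective: alternative
-- what changed: B never materializes columns: it streams the token rows bottom-up (reversed), so the first token seen for a column index is its operator, and every later token for that index is folded immediately into a per-column running accumulator (0/+ or 1/*), relying on commutativity of + and *; A instead builds a dict of complete column lists top-down and reduces each list afterwards.
import Mathlib
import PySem

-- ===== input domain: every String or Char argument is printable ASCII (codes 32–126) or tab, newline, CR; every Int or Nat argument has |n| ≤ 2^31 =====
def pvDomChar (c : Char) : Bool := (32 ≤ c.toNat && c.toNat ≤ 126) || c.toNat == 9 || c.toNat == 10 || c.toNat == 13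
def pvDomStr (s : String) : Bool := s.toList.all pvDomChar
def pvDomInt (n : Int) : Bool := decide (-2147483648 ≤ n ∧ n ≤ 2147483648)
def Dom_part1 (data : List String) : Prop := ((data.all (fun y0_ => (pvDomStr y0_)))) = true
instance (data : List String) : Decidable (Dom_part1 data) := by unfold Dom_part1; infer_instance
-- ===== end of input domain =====

-- B streams the token rows bottom-up with per-column running accumulators (the first token seen
-- for a column index is its operator), instead of A's top-down build of complete column lists.


-- ===== PORT A =====
def part1 (data : List String) : Int :=
  let rows := data.map (fun s => (PySem.Str.split? s " ").getD [])
  let columns : PySem.Dict Int (List String) :=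
    rows.foldl (fun cols row =>
      (row.foldl (fun (st : PySem.Dict Int (List String) × Int) s =>
        if 0 < PySem.Str.len s then
          match st.1.get? st.2 with
          | none   => (st.1.insert st.2 [s], st.2 + 1)
          | some v => (st.1.insert st.2 (v ++ [s]), st.2 + 1)
        else st) (cols, 0)).1) PySem.Dict.empty
  columns.values.foldl (fun count column =>
    match PySem.List.pyGet? column (-1) with
    | none => count
    | some operator =>
      if operator = "+" then
        count + (PySem.List.slice column none (some (-1))).foldl
          (fun add s => add + (PySem.Int.ofStr? s).getD 0) 0
      else if operator = "*" then
        count + (PySem.List.slice column none (some (-1))).foldl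
          (fun mul s => mul * (PySem.Int.ofStr? s).getD 0) 1
      else count) 0

-- ===== PORT B =====
def part1_alt (data : List String) : Int :=
  let tokenRows := data.map (fun s => ((PySem.Str.split? s " ").getD []).filter (fun t => t ≠ ""))
  let state : PySem.Dict Int (Option (String × Int)) :=
    tokenRows.reverse.foldl (fun st row =>
      (PySem.List.enumerate row).foldl (fun st jt =>
        match st.get? jt.1 with
        | none =>
            st.insert jt.1 (if jt.2 = "+" then some ("+", 0)
                            else if jt.2 = "*" then some ("*", 1) else none)
        | some none => st
        | some (some oa) =>
            st.insert jt.1 (if oa.1 = "+" then some (oa.1, oa.2 + (PySem.Int.ofStr? jt.2).getD 0)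
                            else some (oa.1, oa.2 * (PySem.Int.ofStr? jt.2).getD 0))) st)
      PySem.Dict.empty
  state.values.foldl (fun s v => match v with | some p => s + p.2 | none => s) 0

-- ===== PRECONDITION & SPEC =====
-- helpers for the precondition (the tokenised rows, one column, the number of columns)
def pvTokRows (data : List String) : List (List String) :=
  data.map (fun s => ((PySem.Str.split? s " ").getD []).filter (fun t => t ≠ ""))
def pvCol (trs : List (List String)) (j : Nat) : List String :=
  trs.filterMap (fun r => r[j]?)
def pvWid (trs : List (List String)) : Nat :=
  trs.foldl (fun m r => max m r.length) 0

-- Pre_ excludes exactly the inputs where the Python A raises: the empty list (count is never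
-- assigned → UnboundLocalError) and inputs whose '+'/'*' columns contain a token int() rejects
-- (ValueError); B's Python raises on the latter too.
def Pre_part1 (data : List String) : Prop :=
  data ≠ [] ∧
  ∀ j ∈ List.range (pvWid (pvTokRows data)),
    ((pvCol (pvTokRows data) j).getLast? = some "+" ∨
     (pvCol (pvTokRows data) j).getLast? = some "*") →
    ∀ t ∈ (pvCol (pvTokRows data) j).dropLast, (PySem.Int.ofStr? t).isSome = true
instance (data : List String) : Decidable (Pre_part1 data) := by unfold Pre_part1; infer_instance

def pvWitness_part1 : List String := ["1 2", "3 4", "+ *"]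

def Spec_part1 (data : List String) (out : Int) : Prop := out = part1_alt data
instance (data : List String) (out : Int) : Decidable (Spec_part1 data out) := by unfold Spec_part1; infer_instance

-- ===== CLAIM (what is proved, stated in full; the proofs are below) =====
def Claim_equal_part1 : Prop := ∀ (data : List String), Dom_part1 data → Pre_part1 data → Spec_part1 data (part1 data)

-- ===== LEMMAS AND PROOFS =====

-- the dict A is building, as a function of the already-processed token rows `trs` and the
-- already-processed prefix `pre` of the current token row
def pvDict (trs : List (List String)) (pre : List String) : PySem.Dict Int (List String) :=
  PySem.Dict.mk ((List.range (max (pvWid trs) pre.length)).map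
    (fun (j : Nat) => ((j : Int), pvCol trs j ++ pre[j]?.toList)))
def pvDict0 (trs : List (List String)) : PySem.Dict Int (List String) :=
  PySem.Dict.mk ((List.range (pvWid trs)).map (fun (j : Nat) => ((j : Int), pvCol trs j)))

lemma pv_get?_mk_rangeMap {ν : Type} (g : Nat → ν) (n c : Nat) :
    (PySem.Dict.mk ((List.range n).map (fun (j : Nat) => ((j : Int), g j)))).get? (c : Int)
      = if c < n then some (g c) else none := by
  have hnd : ((List.range n).map (fun (j : Nat) => ((j : Int), g j))).map Prod.fst |>.Nodup := by
    simp [List.map_map, Function.comp_def]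
    exact (List.nodup_range).map (fun a b => by exact_mod_cast id)
  split
  · next h =>
    apply PySem.Dict.get?_of_mem_items
    · exact List.mem_map.mpr ⟨c, List.mem_range.mpr h, rfl⟩
    · simpa [PySem.Dict.keys] using hnd
  · next h =>
    rw [PySem.Dict.get?_eq_none_iff_not_mem_keys]
    simp [PySem.Dict.keys, List.map_map, Function.comp_def]
    omega

lemma pv_col_nil_of_wid_le (trs : List (List String)) (j : Nat) (h : pvWid trs ≤ j) :
    pvCol trs j = [] := by
  unfold pvCol
  rw [List.filterMap_eq_nil_iff]
  intro r hr
  have := (PySem.List.le_foldl_max_nat trs (fun r => r.length) 0).2 r hr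
  exact List.getElem?_eq_none (by unfold pvWid at h; omega)

lemma pv_step (trs : List (List String)) (pre : List String) (t : String) :
    (match (pvDict trs pre).get? ((pre.length : Nat) : Int) with
      | none   => ((pvDict trs pre).insert ((pre.length : Nat) : Int) [t], ((pre.length : Nat) : Int) + 1)
      | some v => ((pvDict trs pre).insert ((pre.length : Nat) : Int) (v ++ [t]), ((pre.length : Nat) : Int) + 1))
    = (pvDict trs (pre ++ [t]), (((pre ++ [t]).length : Nat) : Int)) := by
  have hget := pv_get?_mk_rangeMap (fun j => pvCol trs j ++ pre[j]?.toList) (max (pvWid trs) pre.length) pre.length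
  by_cases h : pre.length < max (pvWid trs) pre.length
  · -- overwrite case: pre.length < pvWid trs
    rw [show (pvDict trs pre).get? (pre.length : Int) = some (pvCol trs pre.length) by
      rw [pvDict, hget]; simp [h]]
    have hcont : (pvDict trs pre).contains ((pre.length : Nat) : Int) = true := by
      rw [PySem.Dict.contains_eq_isSome_get?, pvDict, hget]; simp [h]
    refine Prod.ext ?_ (by simp)
    apply PySem.Dict.ext
    rw [PySem.Dict.items_insert_of_contains _ _ hcont]
    show (((List.range (max (pvWid trs) pre.length)).map
        (fun (j : Nat) => ((j : Int), pvCol trs j ++ pre[j]?.toList))).map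
        (fun p => if p.1 == ((pre.length : Nat) : Int) then (((pre.length : Nat) : Int), pvCol trs pre.length ++ [t]) else p))
      = (List.range (max (pvWid trs) (pre ++ [t]).length)).map
        (fun (j : Nat) => ((j : Int), pvCol trs j ++ (pre ++ [t])[j]?.toList))
    have hw : max (pvWid trs) (pre ++ [t]).length = max (pvWid trs) pre.length := by
      simp; omega
    rw [hw, List.map_map]
    apply List.map_congr_left
    intro j hj
    rcases lt_trichotomy j pre.length with hlt | heq | hgt
    · simp [show ¬((j : Int) = (pre.length : Int)) by exact_mod_cast Nat.ne_of_lt hlt,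
        List.getElem?_append_left hlt]
    · subst heq
      simp
    · simp [show ¬((j : Int) = (pre.length : Int)) by exact_mod_cast (Nat.ne_of_lt hgt).symm,
        List.getElem?_eq_none (show pre.length ≤ j by omega),
        List.getElem?_eq_none (show (pre ++ [t]).length ≤ j by simp; omega)]
  · -- append case: pvWid trs ≤ pre.length
    have hwle : pvWid trs ≤ pre.length := by omega
    rw [show (pvDict trs pre).get? (pre.length : Int) = none by rw [pvDict, hget]; simp [h]]
    have hcont : (pvDict trs pre).contains ((pre.length : Nat) : Int) = false := by
      rw [PySem.Dict.contains_eq_isSome_get?, pvDict, hget]; simp [h]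
    refine Prod.ext ?_ (by simp)
    apply PySem.Dict.ext
    rw [PySem.Dict.items_insert_of_not_contains _ _ hcont]
    show ((List.range (max (pvWid trs) pre.length)).map
        (fun (j : Nat) => ((j : Int), pvCol trs j ++ pre[j]?.toList))) ++ [(((pre.length : Nat) : Int), [t])]
      = (List.range (max (pvWid trs) (pre ++ [t]).length)).map
        (fun (j : Nat) => ((j : Int), pvCol trs j ++ (pre ++ [t])[j]?.toList))
    have hw1 : max (pvWid trs) pre.length = pre.length := by omega
    have hw2 : max (pvWid trs) (pre ++ [t]).length = pre.length + 1 := by simp; omega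
    rw [hw1, hw2, List.range_succ, List.map_append]
    congr 1
    · apply List.map_congr_left
      intro j hj
      rw [List.getElem?_append_left (List.mem_range.mp hj)]
    · simp [pv_col_nil_of_wid_le trs pre.length hwle]

lemma pv_dict_nil (trs : List (List String)) : pvDict trs [] = pvDict0 trs := by
  unfold pvDict pvDict0; simp

lemma pv_dict_full (trs : List (List String)) (tr : List String) :
    pvDict trs tr = pvDict0 (trs ++ [tr]) := by
  unfold pvDict pvDict0
  have hw : pvWid (trs ++ [tr]) = max (pvWid trs) tr.length := by
    unfold pvWid; rw [List.foldl_append]; simp [Nat.max_comm]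
  have hc : ∀ j : Nat, pvCol (trs ++ [tr]) j = pvCol trs j ++ tr[j]?.toList := by
    intro j; unfold pvCol; rw [List.filterMap_append]; cases h : tr[j]? <;> simp [List.filterMap, h]
  rw [hw]
  congr 1
  apply List.map_congr_left
  intro j hj
  rw [hc]

lemma pv_row (trs : List (List String)) (rest : List String) : ∀ (pre : List String),
    rest.foldl (fun (st : PySem.Dict Int (List String) × Int) s =>
        match st.1.get? st.2 with
        | none   => (st.1.insert st.2 [s], st.2 + 1)
        | some v => (st.1.insert st.2 (v ++ [s]), st.2 + 1))
      (pvDict trs pre, ((pre.length : Nat) : Int))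
    = (pvDict trs (pre ++ rest), (((pre ++ rest).length : Nat) : Int)) := by
  induction rest with
  | nil => intro pre; simp
  | cons t rest ih =>
    intro pre
    rw [List.foldl_cons]
    have hs := pv_step trs pre t
    simp only at hs ⊢
    rw [hs, ih (pre ++ [t])]
    simp

lemma pv_rows (rows : List (List String)) : ∀ (trs : List (List String)),
    rows.foldl (fun cols row =>
      (row.foldl (fun (st : PySem.Dict Int (List String) × Int) s =>
        match st.1.get? st.2 with
        | none   => (st.1.insert st.2 [s], st.2 + 1)
        | some v => (st.1.insert st.2 (v ++ [s]), st.2 + 1)) (cols, 0)).1) (pvDict0 trs)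
    = pvDict0 (trs ++ rows) := by
  induction rows with
  | nil => intro trs; simp
  | cons row rows ih =>
    intro trs
    rw [List.foldl_cons]
    rw [show ((pvDict0 trs : PySem.Dict Int (List String)), (0:Int)) = (pvDict trs [], ((([] : List String).length : Nat) : Int)) from by rw [pv_dict_nil]; rfl]
    rw [pv_row trs row []]
    simp only [List.nil_append]
    rw [pv_dict_full, ih]; simp

lemma pv_len_pos (s : String) : (decide (0 < PySem.Str.len s)) = decide (s ≠ "") := by
  rw [PySem.Str.len_eq]
  rcases h : s.toList with _ | ⟨c, cs⟩
  · simp [String.toList_eq_nil_iff.mp h]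
  · have hne : s ≠ "" := by intro he; rw [he] at h; simp at h
    simp [hne]

lemma pv_columns (data : List String) :
    (data.map (fun s => (PySem.Str.split? s " ").getD [])).foldl (fun cols row =>
      (row.foldl (fun (st : PySem.Dict Int (List String) × Int) s =>
        if 0 < PySem.Str.len s then
          match st.1.get? st.2 with
          | none   => (st.1.insert st.2 [s], st.2 + 1)
          | some v => (st.1.insert st.2 (v ++ [s]), st.2 + 1)
        else st) (cols, 0)).1) PySem.Dict.empty
    = pvDict0 (pvTokRows data) := by
  have hstep : ∀ (cols : PySem.Dict Int (List String)) (row : List String),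
      (row.foldl (fun (st : PySem.Dict Int (List String) × Int) s =>
        if 0 < PySem.Str.len s then
          match st.1.get? st.2 with
          | none   => (st.1.insert st.2 [s], st.2 + 1)
          | some v => (st.1.insert st.2 (v ++ [s]), st.2 + 1)
        else st) (cols, 0)).1
      = ((row.filter (fun t => t ≠ "")).foldl (fun (st : PySem.Dict Int (List String) × Int) s =>
          match st.1.get? st.2 with
          | none   => (st.1.insert st.2 [s], st.2 + 1)
          | some v => (st.1.insert st.2 (v ++ [s]), st.2 + 1)) (cols, 0)).1 := by
    intro cols row
    rw [PySem.List.foldl_ite_eq_foldl_filter]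
    congr 1
    congr 1
    exact List.filter_congr (fun s _ => pv_len_pos s)
  rw [PySem.List.foldl_congr_mem _ _ _ _ (fun cols row _ => hstep cols row)]
  rw [← List.foldl_map (f := fun row => List.filter (fun t => decide (t ≠ "")) row)
      (g := fun (cols : PySem.Dict Int (List String)) row =>
        (row.foldl (fun (st : PySem.Dict Int (List String) × Int) s =>
          match st.1.get? st.2 with
          | none   => (st.1.insert st.2 [s], st.2 + 1)
          | some v => (st.1.insert st.2 (v ++ [s]), st.2 + 1)) (cols, 0)).1)]
  rw [List.map_map]
  rw [show PySem.Dict.empty = pvDict0 [] from rfl]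
  rw [pv_rows]
  rfl

-- ===== B-side machinery: the streaming state as a function of the processed suffix =====

def pvAddF (a : Int) (t : String) : Int := a + (PySem.Int.ofStr? t).getD 0
def pvMulF (a : Int) (t : String) : Int := a * (PySem.Int.ofStr? t).getD 0

-- the value B's state holds for a column whose processed (reversed) contents are `col`
def pvG (col : List String) : Option (String × Int) :=
  match col with
  | [] => none
  | op :: rest =>
      if op = "+" then some ("+", rest.foldl pvAddF 0)
      else if op = "*" then some ("*", rest.foldl pvMulF 1)
      else none

def pvDictB (trs : List (List String)) (pre : List String) : PySem.Dict Int (Option (String × Int)) :=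
  PySem.Dict.mk ((List.range (max (pvWid trs) pre.length)).map
    (fun (j : Nat) => ((j : Int), pvG (pvCol trs j ++ pre[j]?.toList))))
def pvDictB0 (trs : List (List String)) : PySem.Dict Int (Option (String × Int)) :=
  PySem.Dict.mk ((List.range (pvWid trs)).map (fun (j : Nat) => ((j : Int), pvG (pvCol trs j))))

-- dict-shape lemmas shared by the B steps
lemma pv_insert_overwrite {ν : Type} (g g' : Nat → ν) (n c : Nat) (hc : c < n)
    (hsame : ∀ j, j ≠ c → g' j = g j) :
    (PySem.Dict.mk ((List.range n).map (fun (j : Nat) => ((j : Int), g j)))).insert ((c : Nat) : Int) (g' c)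
      = PySem.Dict.mk ((List.range n).map (fun (j : Nat) => ((j : Int), g' j))) := by
  have hcont : (PySem.Dict.mk ((List.range n).map (fun (j : Nat) => ((j : Int), g j)))).contains ((c : Nat) : Int) = true := by
    rw [PySem.Dict.contains_eq_isSome_get?, pv_get?_mk_rangeMap]; simp [hc]
  apply PySem.Dict.ext
  rw [PySem.Dict.items_insert_of_contains _ _ hcont]
  show ((List.range n).map (fun (j : Nat) => ((j : Int), g j))).map
      (fun p => if p.1 == ((c : Nat) : Int) then (((c : Nat) : Int), g' c) else p)
    = (List.range n).map (fun (j : Nat) => ((j : Int), g' j))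
  rw [List.map_map]
  apply List.map_congr_left
  intro j hj
  by_cases h : j = c
  · subst h; simp
  · simp [show ¬((j : Int) = (c : Int)) by exact_mod_cast h, hsame j h]

lemma pv_insert_append {ν : Type} (g g' : Nat → ν) (n : Nat)
    (hsame : ∀ j, j < n → g' j = g j) :
    (PySem.Dict.mk ((List.range n).map (fun (j : Nat) => ((j : Int), g j)))).insert ((n : Nat) : Int) (g' n)
      = PySem.Dict.mk ((List.range (n + 1)).map (fun (j : Nat) => ((j : Int), g' j))) := by
  have hcont : (PySem.Dict.mk ((List.range n).map (fun (j : Nat) => ((j : Int), g j)))).contains ((n : Nat) : Int) = false := by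
    rw [PySem.Dict.contains_eq_isSome_get?, pv_get?_mk_rangeMap]; simp
  apply PySem.Dict.ext
  rw [PySem.Dict.items_insert_of_not_contains _ _ hcont]
  show ((List.range n).map (fun (j : Nat) => ((j : Int), g j))) ++ [(((n : Nat) : Int), g' n)]
    = (List.range (n + 1)).map (fun (j : Nat) => ((j : Int), g' j))
  rw [List.range_succ, List.map_append]
  congr 1
  apply List.map_congr_left
  intro j hj
  rw [hsame j (List.mem_range.mp hj)]

lemma pv_foldl_max_shift (l : List (List String)) : ∀ (a : Nat),
    l.foldl (fun m r => max m r.length) a = max a (l.foldl (fun m r => max m r.length) 0) := by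
  induction l with
  | nil => simp
  | cons r l ih =>
    intro a
    rw [List.foldl_cons, List.foldl_cons, ih (max a r.length), ih (max 0 r.length)]
    omega

lemma pv_wid_le (trs : List (List String)) (j : Nat) (h : ∀ r ∈ trs, r.length ≤ j) :
    pvWid trs ≤ j := by
  induction trs with
  | nil => simp [pvWid]
  | cons r l ih =>
    have h1 := h r (by simp)
    have hl := ih (fun r' hr' => h r' (by simp [hr']))
    unfold pvWid
    rw [List.foldl_cons, pv_foldl_max_shift]
    unfold pvWid at hl
    omega

lemma pv_col_ne_nil_of_lt_wid (trs : List (List String)) (j : Nat) (h : j < pvWid trs) :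
    pvCol trs j ≠ [] := by
  intro hnil
  unfold pvCol at hnil
  rw [List.filterMap_eq_nil_iff] at hnil
  have hle : ∀ r ∈ trs, r.length ≤ j := by
    intro r hr
    exact List.getElem?_eq_none_iff.mp (by simpa using hnil r hr)
  have := pv_wid_le trs j hle
  omega

-- B's inner-loop body
def pvStepB (st : PySem.Dict Int (Option (String × Int))) (jt : Int × String) :
    PySem.Dict Int (Option (String × Int)) :=
  match st.get? jt.1 with
  | none =>
      st.insert jt.1 (if jt.2 = "+" then some ("+", 0)
                      else if jt.2 = "*" then some ("*", 1) else none)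
  | some none => st
  | some (some oa) =>
      st.insert jt.1 (if oa.1 = "+" then some (oa.1, oa.2 + (PySem.Int.ofStr? jt.2).getD 0)
                      else some (oa.1, oa.2 * (PySem.Int.ofStr? jt.2).getD 0))

lemma pv_same_of_ne (trs : List (List String)) (pre : List String) (t : String) :
    ∀ j, j ≠ pre.length →
      pvG (pvCol trs j ++ (pre ++ [t])[j]?.toList) = pvG (pvCol trs j ++ pre[j]?.toList) := by
  intro j hj
  rcases lt_or_gt_of_ne hj with hlt | hgt
  · rw [List.getElem?_append_left hlt]
  · rw [List.getElem?_eq_none (show pre.length ≤ j by omega),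
      List.getElem?_eq_none (show (pre ++ [t]).length ≤ j by simp; omega)]

lemma pv_stepB_eq (trs : List (List String)) (pre : List String) (t : String) :
    pvStepB (pvDictB trs pre) (((pre.length : Nat) : Int), t) = pvDictB trs (pre ++ [t]) := by
  have hget := pv_get?_mk_rangeMap (fun j => pvG (pvCol trs j ++ pre[j]?.toList))
    (max (pvWid trs) pre.length) pre.length
  have hnew : pvG (pvCol trs pre.length ++ (pre ++ [t])[pre.length]?.toList)
      = pvG (pvCol trs pre.length ++ [t]) := by
    rw [List.getElem?_concat_length]; rfl
  by_cases h : pre.length < max (pvWid trs) pre.length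
  · -- existing key: the column pvCol trs pre.length is nonempty (pre.length < pvWid trs)
    have hwid : pre.length < pvWid trs := by omega
    have hcol : pvCol trs pre.length ≠ [] := pv_col_ne_nil_of_lt_wid trs pre.length hwid
    obtain ⟨op, rest, hcolsplit⟩ := List.exists_cons_of_ne_nil hcol
    have hmax : max (pvWid trs) (pre ++ [t]).length = max (pvWid trs) pre.length := by
      simp; omega
    have hgetv : (pvDictB trs pre).get? ((pre.length : Nat) : Int)
        = some (pvG (pvCol trs pre.length)) := by
      rw [pvDictB, hget]; simp [h]
    have hins := pv_insert_overwrite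
      (fun j => pvG (pvCol trs j ++ pre[j]?.toList))
      (fun j => pvG (pvCol trs j ++ (pre ++ [t])[j]?.toList))
      (max (pvWid trs) pre.length) pre.length h (pv_same_of_ne trs pre t)
    by_cases hplus : op = "+"
    · subst hplus
      have hgetv' : (pvDictB trs pre).get? ((pre.length : Nat) : Int)
          = some (some ("+", rest.foldl pvAddF 0)) := by
        rw [hgetv, hcolsplit]; simp [pvG]
      unfold pvStepB
      rw [hgetv']
      show (pvDictB trs pre).insert ((pre.length : Nat) : Int)
          (if ("+", rest.foldl pvAddF 0).1 = "+"
            then some (("+", rest.foldl pvAddF 0).1, ("+", rest.foldl pvAddF 0).2 + (PySem.Int.ofStr? t).getD 0)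
            else some (("+", rest.foldl pvAddF 0).1, ("+", rest.foldl pvAddF 0).2 * (PySem.Int.ofStr? t).getD 0))
        = pvDictB trs (pre ++ [t])
      rw [if_pos rfl]
      unfold pvDictB
      rw [hmax, ← hins]
      congr 1
      show some ("+", rest.foldl pvAddF 0 + (PySem.Int.ofStr? t).getD 0)
        = pvG (pvCol trs pre.length ++ (pre ++ [t])[pre.length]?.toList)
      rw [hnew, hcolsplit]
      simp [pvG, List.foldl_append, pvAddF]
    · by_cases hmul : op = "*"
      · subst hmul
        have hgetv' : (pvDictB trs pre).get? ((pre.length : Nat) : Int)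
            = some (some ("*", rest.foldl pvMulF 1)) := by
          rw [hgetv, hcolsplit]; simp [pvG]
        unfold pvStepB
        rw [hgetv']
        show (pvDictB trs pre).insert ((pre.length : Nat) : Int)
            (if ("*", rest.foldl pvMulF 1).1 = "+"
              then some (("*", rest.foldl pvMulF 1).1, ("*", rest.foldl pvMulF 1).2 + (PySem.Int.ofStr? t).getD 0)
              else some (("*", rest.foldl pvMulF 1).1, ("*", rest.foldl pvMulF 1).2 * (PySem.Int.ofStr? t).getD 0))
          = pvDictB trs (pre ++ [t])
        rw [if_neg (show ¬(("*", rest.foldl pvMulF 1) : String × Int).1 = "+" from by simp)]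
        unfold pvDictB
        rw [hmax, ← hins]
        congr 1
        show some ("*", rest.foldl pvMulF 1 * (PySem.Int.ofStr? t).getD 0)
          = pvG (pvCol trs pre.length ++ (pre ++ [t])[pre.length]?.toList)
        rw [hnew, hcolsplit]
        simp [pvG, List.foldl_append, pvMulF]
      · -- skipped column: state holds none and is left unchanged
        have hgetv' : (pvDictB trs pre).get? ((pre.length : Nat) : Int) = some none := by
          rw [hgetv, hcolsplit]; simp [pvG, hplus, hmul]
        unfold pvStepB
        rw [hgetv']
        show pvDictB trs pre = pvDictB trs (pre ++ [t])
        unfold pvDictB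
        rw [hmax]
        congr 1
        apply List.map_congr_left
        intro j hj
        by_cases hjc : j = pre.length
        · subst hjc
          congr 1
          rw [hnew, hcolsplit, List.getElem?_eq_none (le_refl pre.length)]
          simp [pvG, hplus, hmul]
        · rw [pv_same_of_ne trs pre t j hjc]
  · -- new key: pvWid trs ≤ pre.length, column empty so far
    have hwle : pvWid trs ≤ pre.length := by omega
    have hnil := pv_col_nil_of_wid_le trs pre.length hwle
    have hgetv : (pvDictB trs pre).get? ((pre.length : Nat) : Int) = none := by
      rw [pvDictB, hget]; simp [h]
    have hmax1 : max (pvWid trs) pre.length = pre.length := by omega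
    have hmax2 : max (pvWid trs) (pre ++ [t]).length = pre.length + 1 := by simp; omega
    have hins := pv_insert_append
      (fun j => pvG (pvCol trs j ++ pre[j]?.toList))
      (fun j => pvG (pvCol trs j ++ (pre ++ [t])[j]?.toList))
      (max (pvWid trs) pre.length)
      (fun j hj => pv_same_of_ne trs pre t j (by omega))
    unfold pvStepB
    rw [hgetv]
    show (pvDictB trs pre).insert ((pre.length : Nat) : Int)
        (if t = "+" then some ("+", 0) else if t = "*" then some ("*", 1) else none)
      = pvDictB trs (pre ++ [t])
    unfold pvDictB
    rw [hmax2, hmax1]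
    rw [hmax1] at hins
    rw [← hins]
    congr 1
    show (if t = "+" then some ("+", 0) else if t = "*" then some ("*", 1) else none)
      = pvG (pvCol trs pre.length ++ (pre ++ [t])[pre.length]?.toList)
    rw [hnew, hnil]
    simp [pvG]

lemma pv_rowB (trs : List (List String)) (rest : List String) : ∀ (pre : List String),
    (PySem.List.enumerate rest ((pre.length : Nat) : Int)).foldl pvStepB (pvDictB trs pre)
      = pvDictB trs (pre ++ rest) := by
  induction rest with
  | nil => intro pre; simp [PySem.List.enumerate_nil]
  | cons t rest ih =>
    intro pre
    rw [PySem.List.enumerate_cons, List.foldl_cons, pv_stepB_eq]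
    have hlen : ((pre.length : Nat) : Int) + 1 = (((pre ++ [t]).length : Nat) : Int) := by
      simp
    rw [hlen, ih (pre ++ [t])]
    simp

lemma pv_dictB_nil (trs : List (List String)) : pvDictB trs [] = pvDictB0 trs := by
  unfold pvDictB pvDictB0; simp

lemma pv_dictB_full (trs : List (List String)) (tr : List String) :
    pvDictB trs tr = pvDictB0 (trs ++ [tr]) := by
  unfold pvDictB pvDictB0
  have hw : pvWid (trs ++ [tr]) = max (pvWid trs) tr.length := by
    unfold pvWid; rw [List.foldl_append]; simp [Nat.max_comm]
  have hc : ∀ j : Nat, pvCol (trs ++ [tr]) j = pvCol trs j ++ tr[j]?.toList := by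
    intro j; unfold pvCol; rw [List.filterMap_append]; cases h : tr[j]? <;> simp [List.filterMap, h]
  rw [hw]
  congr 1
  apply List.map_congr_left
  intro j hj
  rw [hc]

lemma pv_rowsB (rows : List (List String)) : ∀ (trs : List (List String)),
    rows.foldl (fun st row => (PySem.List.enumerate row).foldl pvStepB st) (pvDictB0 trs)
      = pvDictB0 (trs ++ rows) := by
  induction rows with
  | nil => intro trs; simp
  | cons row rows ih =>
    intro trs
    rw [List.foldl_cons]
    rw [show (pvDictB0 trs : PySem.Dict Int (Option (String × Int))) = pvDictB trs [] from (pv_dictB_nil trs).symm]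
    rw [show (PySem.List.enumerate row : List (Int × String)) = PySem.List.enumerate row ((([] : List String).length : Nat) : Int) from by norm_num]
    rw [pv_rowB trs row []]
    simp only [List.nil_append]
    rw [pv_dictB_full, ih]; simp

-- width and column of the reversed row list
lemma pv_wid_reverse (l : List (List String)) : pvWid l.reverse = pvWid l := by
  induction l with
  | nil => rfl
  | cons r l ih =>
    rw [List.reverse_cons]
    unfold pvWid at ih ⊢
    rw [List.foldl_append]
    simp only [List.foldl_cons, List.foldl_nil]
    rw [ih, pv_foldl_max_shift l (max 0 r.length)]
    omega

lemma pv_col_reverse (l : List (List String)) (j : Nat) :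
    pvCol l.reverse j = (pvCol l j).reverse := by
  unfold pvCol
  exact List.filterMap_reverse

-- per-column agreement of the two final folds
lemma pv_col_agree (acc : Int) (col : List String) (hcol : col ≠ []) :
    (match PySem.List.pyGet? col (-1) with
      | none => acc
      | some operator =>
        if operator = "+" then
          acc + (PySem.List.slice col none (some (-1))).foldl
            (fun add s => add + (PySem.Int.ofStr? s).getD 0) 0
        else if operator = "*" then
          acc + (PySem.List.slice col none (some (-1))).foldl
            (fun mul s => mul * (PySem.Int.ofStr? s).getD 0) 1
        else acc)
    = (match pvG col.reverse with | some p => acc + p.2 | none => acc) := by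
  obtain ⟨ys, x, hsplit⟩ : ∃ ys x, col = ys ++ [x] :=
    ⟨col.dropLast, col.getLast hcol, (List.dropLast_concat_getLast hcol).symm⟩
  subst hsplit
  rw [PySem.List.pyGet?_neg_one, PySem.List.slice_to_neg_one,
    List.getLast?_concat, List.dropLast_concat, List.reverse_concat]
  by_cases hplus : x = "+"
  · subst hplus
    have h1 : ys.foldl (fun add s => add + (PySem.Int.ofStr? s).getD 0) 0
        = (ys.map (fun s => (PySem.Int.ofStr? s).getD 0)).sum := by
      rw [PySem.List.foldl_add]; simp
    have h2 : ys.reverse.foldl pvAddF 0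
        = (ys.reverse.map (fun s => (PySem.Int.ofStr? s).getD 0)).sum := by
      rw [show pvAddF = (fun a t => a + (PySem.Int.ofStr? t).getD 0) from rfl,
        PySem.List.foldl_add]; simp
    simp [pvG, h1, h2, List.map_reverse, List.sum_reverse]
  · by_cases hmul : x = "*"
    · subst hmul
      have h1 : ys.foldl (fun mul s => mul * (PySem.Int.ofStr? s).getD 0) 1
          = (ys.map (fun s => (PySem.Int.ofStr? s).getD 0)).prod := by
        rw [List.prod_eq_foldl, List.foldl_map]
      have h2 : ys.reverse.foldl pvMulF 1
          = (ys.reverse.map (fun s => (PySem.Int.ofStr? s).getD 0)).prod := by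
        rw [List.prod_eq_foldl, List.foldl_map]; rfl
      simp [pvG, h1, h2, List.map_reverse, List.prod_reverse]
    · simp [pvG, hplus, hmul]

theorem pv_main (data : List String) : part1 data = part1_alt data := by
  unfold part1 part1_alt
  dsimp only
  rw [pv_columns]
  rw [show (fun (st : PySem.Dict Int (Option (String × Int))) (row : List String) =>
        (PySem.List.enumerate row).foldl (fun st jt =>
          match st.get? jt.1 with
          | none =>
              st.insert jt.1 (if jt.2 = "+" then some ("+", 0)
                              else if jt.2 = "*" then some ("*", 1) else none)
          | some none => st
          | some (some oa) =>
              st.insert jt.1 (if oa.1 = "+" then some (oa.1, oa.2 + (PySem.Int.ofStr? jt.2).getD 0)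
                              else some (oa.1, oa.2 * (PySem.Int.ofStr? jt.2).getD 0))) st)
      = (fun st row => (PySem.List.enumerate row).foldl pvStepB st) from rfl]
  rw [show (PySem.Dict.empty : PySem.Dict Int (Option (String × Int))) = pvDictB0 [] from rfl]
  rw [show (data.map (fun s => ((PySem.Str.split? s " ").getD []).filter (fun t => t ≠ ""))) = pvTokRows data from rfl]
  rw [pv_rowsB]
  simp only [List.nil_append]
  unfold pvDict0 pvDictB0
  rw [PySem.Dict.values_mk, PySem.Dict.values_mk, List.map_map, List.map_map]
  rw [show ((fun (x : Int × List String) => x.2) ∘ fun (j : Nat) => ((j : Int), pvCol (pvTokRows data) j))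
      = (fun (j : Nat) => pvCol (pvTokRows data) j) from rfl]
  rw [show ((fun (x : Int × Option (String × Int)) => x.2) ∘ fun (j : Nat) => ((j : Int), pvG (pvCol (pvTokRows data).reverse j)))
      = (fun (j : Nat) => pvG (pvCol (pvTokRows data).reverse j)) from rfl]
  rw [List.foldl_map, List.foldl_map, pv_wid_reverse]
  apply PySem.List.foldl_congr_mem
  intro acc j hj
  dsimp only
  rw [pv_col_reverse]
  exact pv_col_agree acc (pvCol (pvTokRows data) j)
    (pv_col_ne_nil_of_lt_wid (pvTokRows data) j (List.mem_range.mp hj))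

-- ===== VERDICT (by name: the statement is the Claim_ definition above) =====
theorem part1_spec : Claim_equal_part1 := by
  intro data _ _
  unfold Spec_part1
  exact pv_main data
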